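-- pv_equiv track=rewrite | github.com/noel-yap/leetcode | maximum_subarray/maximum_subarray.py | squash
-- ===== SOURCE A (Python) =====
-- import math
-- from typing import List
--
-- def squash(lst: List[int]):
--     non_zero = []
--
--     if len(lst) == 0:
--         return []
--
--     for e in lst:
--         if e != 0:
--             non_zero.append(e)
--
--     if len(non_zero) == 0:
--         return non_zero
--
--     result = [non_zero[0]]
--     for i in range(1, len(non_zero)):
--         if math.copysign(1, result[-1]) != math.copysign(1, non_zero[i]):
--             result.append(non_zero[i])
--         else:
--             result[-1] += non_zero[i]
--
--     while len(result) > 0 and result[0] < 0: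
--         result.pop(0)
--
--     while len(result) > 0 and result[-1] < 0:
--         result.pop()
--
--     while len(result) > 1 and result[0] + result[1] < 0:
--         result = result[2:]
--
--     while len(result) > 1 and result[-1] + result[-2] < 0:
--         result = result[:-2]
--
--     return result
-- ===== SOURCE B (Python) =====
-- def squash(lst):
--     # one fused pass builds the alternating-sign sums; trimming moves lo/hi
--     # index pointers instead of pop(0)/slicing, with a single slice at the end
--     acc = []
--     for e in lst:
--         if e == 0:
--             continue
--         if acc and (acc[-1] < 0) == (e < 0):
--             acc[-1] += e
--         else:
--             acc.append(e)
--     lo, hi = 0, len(acc)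
--     while lo < hi and acc[lo] < 0:
--         lo += 1
--     while lo < hi and acc[hi - 1] < 0:
--         hi -= 1
--     while hi - lo > 1 and acc[lo] + acc[lo + 1] < 0:
--         lo += 2
--     while hi - lo > 1 and acc[hi - 1] + acc[hi - 2] < 0:
--         hi -= 2
--     return acc[lo:hi]
-- ===== Notes on version B (the rewrite author's own statement) =====
-- stated objective: faster
-- what changed: B fuses the zero-filter into a single squashing pass and replaces A's pop(0)/slice-copy trim loops by lo/hi index pointers with one final slice.
import Mathlib
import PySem

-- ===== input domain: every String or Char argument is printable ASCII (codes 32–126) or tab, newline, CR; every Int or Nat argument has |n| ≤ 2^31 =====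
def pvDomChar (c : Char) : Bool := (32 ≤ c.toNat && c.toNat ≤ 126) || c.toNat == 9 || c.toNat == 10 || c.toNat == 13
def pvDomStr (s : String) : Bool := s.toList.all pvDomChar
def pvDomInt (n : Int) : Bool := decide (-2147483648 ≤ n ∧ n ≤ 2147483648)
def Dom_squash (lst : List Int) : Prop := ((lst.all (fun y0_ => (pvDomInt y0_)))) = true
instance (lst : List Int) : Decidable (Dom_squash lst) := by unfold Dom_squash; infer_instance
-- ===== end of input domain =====

-- B replaces A's quadratic pop(0)/slicing trim loops by lo/hi index pointers with one
-- final slice, and fuses the zero-filter into the squashing pass (alternative/faster).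

-- ===== PORT A =====

-- math.copysign(1, x) for a Python int x: exact (ints have no negative zero)
def pySign (x : Int) : Int := if x < 0 then -1 else 1

-- one iteration of A's squashing loop; `result` is kept in REVERSED order so that
-- `result.append(..)` / `result[-1] += ..` are head operations (values identical)
def squashStepA (r : List Int) (x : Int) : List Int :=
  match r with
  | [] => [x]
  | last :: rest => if pySign last ≠ pySign x then x :: last :: rest else (last + x) :: rest

-- while len(result) > 0 and result[0] < 0: result.pop(0)
def trimFrontA : List Int → List Int
  | [] => []
  | x :: xs => if x < 0 then trimFrontA xs else x :: xs

-- while len(result) > 0 and result[-1] < 0: result.pop()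
def trimBackA (r : List Int) : List Int :=
  if _h : 0 < r.length ∧ r.getLastD 0 < 0 then trimBackA r.dropLast else r
termination_by r.length
decreasing_by simp [List.length_dropLast]; omega

-- while len(result) > 1 and result[0] + result[1] < 0: result = result[2:]
def trimPairsFrontA : List Int → List Int
  | a :: b :: rest => if a + b < 0 then trimPairsFrontA rest else a :: b :: rest
  | r => r

-- while len(result) > 1 and result[-1] + result[-2] < 0: result = result[:-2]
def trimPairsBackA (r : List Int) : List Int :=
  if _h : 1 < r.length ∧ r.getLastD 0 + r.dropLast.getLastD 0 < 0 then
    trimPairsBackA r.dropLast.dropLast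
  else r
termination_by r.length
decreasing_by simp [List.length_dropLast]; omega

def squash (lst : List Int) : List Int :=
  if lst = [] then []
  else
    let nonZero := lst.foldl (fun nz e => if e ≠ 0 then nz ++ [e] else nz) []
    match nonZero with
    | [] => []
    | h :: t =>
      let result := (t.foldl squashStepA [h]).reverse
      trimPairsBackA (trimPairsFrontA (trimBackA (trimFrontA result)))

-- ===== PORT B =====

-- one iteration of B's fused build loop; `acc` kept in REVERSED order (see above)
def squashStepB (acc : List Int) (e : Int) : List Int :=
  if e = 0 then acc
  else
    match acc with
    | [] => [e]
    | a :: rest => if decide (a < 0) = decide (e < 0) then (a + e) :: rest else e :: a :: rest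

-- while lo < hi and acc[lo] < 0: lo += 1   (lo, hi are always ≥ 0: Nat)
def loLoop1 (acc : List Int) (lo hi : Nat) : Nat :=
  if h : lo < hi ∧ acc.getD lo 0 < 0 then loLoop1 acc (lo + 1) hi else lo
termination_by hi - lo
decreasing_by omega

-- while lo < hi and acc[hi-1] < 0: hi -= 1
def hiLoop1 (acc : List Int) (lo hi : Nat) : Nat :=
  if h : lo < hi ∧ acc.getD (hi - 1) 0 < 0 then hiLoop1 acc lo (hi - 1) else hi
termination_by hi
decreasing_by omega

-- while hi - lo > 1 and acc[lo] + acc[lo+1] < 0: lo += 2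
def loLoop2 (acc : List Int) (lo hi : Nat) : Nat :=
  if h : lo + 1 < hi ∧ acc.getD lo 0 + acc.getD (lo + 1) 0 < 0 then loLoop2 acc (lo + 2) hi else lo
termination_by hi - lo
decreasing_by omega

-- while hi - lo > 1 and acc[hi-1] + acc[hi-2] < 0: hi -= 2
def hiLoop2 (acc : List Int) (lo hi : Nat) : Nat :=
  if h : lo + 1 < hi ∧ acc.getD (hi - 1) 0 + acc.getD (hi - 2) 0 < 0 then hiLoop2 acc lo (hi - 2)
  else hi
termination_by hi
decreasing_by omega

def squash_alt (lst : List Int) : List Int :=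
  let acc := (lst.foldl squashStepB []).reverse
  let n := acc.length
  let lo1 := loLoop1 acc 0 n
  let hi1 := hiLoop1 acc lo1 n
  let lo2 := loLoop2 acc lo1 hi1
  let hi2 := hiLoop2 acc lo2 hi1
  (acc.drop lo2).take (hi2 - lo2)   -- acc[lo:hi], exact for 0 ≤ lo and 0 ≤ hi ≤ len(acc)

-- ===== PRECONDITION & SPEC =====
def Spec_squash (lst : List Int) (out : List Int) : Prop := out = squash_alt lst
instance (lst : List Int) (out : List Int) : Decidable (Spec_squash lst out) := by unfold Spec_squash; infer_instance

-- ===== CLAIM (what is proved, stated in full; the proofs are below) =====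
def Claim_equal_squash : Prop := ∀ (lst : List Int), Dom_squash lst → Spec_squash lst (squash lst)

-- ===== LEMMAS AND PROOFS =====

-- the slice acc[lo:hi] (0 ≤ lo, hi ≤ len) that the trim loops are really computing
def seg (acc : List Int) (lo hi : Nat) : List Int := (acc.drop lo).take (hi - lo)

theorem seg_length (acc : List Int) (lo hi : Nat) (hlen : hi ≤ acc.length) :
    (seg acc lo hi).length = hi - lo := by
  simp [seg]; omega

theorem seg_empty (acc : List Int) (lo hi : Nat) (h : hi ≤ lo) : seg acc lo hi = [] := by
  simp [seg, Nat.sub_eq_zero_of_le h]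

theorem seg_cons (acc : List Int) (lo hi : Nat) (h : lo < hi) (hlen : hi ≤ acc.length) :
    seg acc lo hi = acc.getD lo 0 :: seg acc (lo + 1) hi := by
  have hlo : lo < acc.length := lt_of_lt_of_le h hlen
  unfold seg
  rw [List.drop_eq_getElem_cons hlo, List.getD_eq_getElem acc 0 hlo]
  have : hi - lo = (hi - (lo + 1)) + 1 := by omega
  rw [this, List.take_succ_cons]

theorem seg_snoc (acc : List Int) (lo hi : Nat) (h : lo < hi) (hlen : hi ≤ acc.length) :
    seg acc lo hi = seg acc lo (hi - 1) ++ [acc.getD (hi - 1) 0] := by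
  have h1 : hi - 1 < acc.length := by omega
  unfold seg
  have h2 : hi - lo = (hi - 1 - lo) + 1 := by omega
  rw [h2, List.take_add_one]
  have h3 : (acc.drop lo)[hi - 1 - lo]? = acc[hi - 1]? := by
    rw [List.getElem?_drop]
    congr 1; omega
  rw [h3, List.getElem?_eq_getElem h1, List.getD_eq_getElem acc 0 h1]
  rfl

theorem seg_full (acc : List Int) : seg acc 0 acc.length = acc := by
  simp [seg]

-- ===== build phase: the two folds produce the same list =====

theorem stepA_eq_stepB (r : List Int) (x : Int) (hx : x ≠ 0) :
    squashStepA r x = squashStepB r x := by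
  cases r with
  | nil => simp [squashStepA, squashStepB, hx]
  | cons a rest =>
    simp only [squashStepA, squashStepB, if_neg hx]
    by_cases ha : a < 0 <;> by_cases hxn : x < 0 <;>
      simp [pySign, ha, hxn]

theorem foldl_appendIf_eq_filter (l : List Int) (init : List Int) :
    l.foldl (fun nz e => if e ≠ 0 then nz ++ [e] else nz) init = init ++ l.filter (· ≠ 0) := by
  induction l generalizing init with
  | nil => simp
  | cons e t ih =>
    rw [List.foldl_cons, List.filter_cons, ih]
    by_cases he : e = 0 <;> simp [he]

theorem foldl_stepB_eq_filter (l : List Int) (init : List Int) :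
    l.foldl squashStepB init = (l.filter (· ≠ 0)).foldl squashStepA init := by
  induction l generalizing init with
  | nil => rfl
  | cons e t ih =>
    by_cases he : e = 0
    · have hz : squashStepB init e = init := by simp [squashStepB, he]
      rw [List.foldl_cons, List.filter_cons, if_neg (by simp [he]), hz, ih]
    · rw [List.foldl_cons, List.filter_cons, if_pos (by simp [he]), List.foldl_cons, ih,
        ← stepA_eq_stepB init e he]

-- ===== trim phase: each of A's four loops computes a pointer move =====

theorem trimFrontA_fix (r : List Int) (h : ∀ a rest, r = a :: rest → ¬ a < 0) :
    trimFrontA r = r := by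
  cases r with
  | nil => rfl
  | cons a rest => simp [trimFrontA, h a rest rfl]

theorem trimPairsFrontA_fix (r : List Int) (h : ∀ a b rest, r = a :: b :: rest → ¬ a + b < 0) :
    trimPairsFrontA r = r := by
  match r with
  | [] => rfl
  | [a] => rfl
  | a :: b :: rest => simp [trimPairsFrontA, h a b rest rfl]

theorem L1 (acc : List Int) (n lo hi : Nat) (hf : hi - lo ≤ n) (hlen : hi ≤ acc.length) :
    trimFrontA (seg acc lo hi) = seg acc (loLoop1 acc lo hi) hi := by
  induction n generalizing lo with
  | zero =>
    have he : hi ≤ lo := by omega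
    rw [seg_empty acc lo hi he, loLoop1, dif_neg (by omega), seg_empty acc lo hi he]
    rfl
  | succ n ih =>
    by_cases c : lo < hi ∧ acc.getD lo 0 < 0
    · rw [loLoop1, dif_pos c, seg_cons acc lo hi c.1 hlen]
      simp only [trimFrontA, if_pos c.2]
      exact ih (lo + 1) (by omega)
    · rw [loLoop1, dif_neg c]
      apply trimFrontA_fix
      intro a rest hr hneg
      by_cases hlt : lo < hi
      · rw [seg_cons acc lo hi hlt hlen] at hr
        cases hr
        exact c ⟨hlt, hneg⟩
      · rw [seg_empty acc lo hi (by omega)] at hr; cases hr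

theorem L2 (acc : List Int) (hi lo : Nat) (hlo : lo ≤ hi) (hlen : hi ≤ acc.length) :
    trimBackA (seg acc lo hi) = seg acc lo (hiLoop1 acc lo hi) := by
  induction hi with
  | zero =>
    rw [hiLoop1, dif_neg (by omega), seg_empty acc lo 0 (by omega), trimBackA]
    simp
  | succ hi ih =>
    by_cases c : lo < hi + 1 ∧ acc.getD (hi + 1 - 1) 0 < 0
    · have hsnoc := seg_snoc acc lo (hi + 1) c.1 hlen
      simp only [Nat.add_sub_cancel] at hsnoc
      simp only [Nat.add_sub_cancel] at c
      rw [hiLoop1, dif_pos (by simpa using c), Nat.add_sub_cancel]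
      rw [trimBackA]
      rw [dif_pos (by
        constructor
        · rw [seg_length acc lo (hi + 1) hlen]; omega
        · rw [hsnoc]; simpa using c.2)]
      rw [hsnoc, List.dropLast_concat]
      exact ih (by omega) (by omega)
    · rw [hiLoop1, dif_neg (by simpa using c)]
      rw [trimBackA, dif_neg]
      intro ⟨h1, h2⟩
      rw [seg_length acc lo (hi + 1) hlen] at h1
      have hlt : lo < hi + 1 := by omega
      rw [seg_snoc acc lo (hi + 1) hlt hlen] at h2
      simp only [Nat.add_sub_cancel, List.getLastD_concat] at h2
      exact c ⟨hlt, by simpa using h2⟩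

theorem L3 (acc : List Int) (n lo hi : Nat) (hf : hi - lo ≤ n) (hlen : hi ≤ acc.length) :
    trimPairsFrontA (seg acc lo hi) = seg acc (loLoop2 acc lo hi) hi := by
  induction n generalizing lo with
  | zero =>
    have he : hi ≤ lo := by omega
    rw [seg_empty acc lo hi he, loLoop2, dif_neg (by omega), seg_empty acc lo hi he]
    rfl
  | succ n ih =>
    by_cases c : lo + 1 < hi ∧ acc.getD lo 0 + acc.getD (lo + 1) 0 < 0
    · rw [loLoop2, dif_pos c, seg_cons acc lo hi (by omega) hlen,
        seg_cons acc (lo + 1) hi c.1 hlen]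
      simp only [trimPairsFrontA, if_pos c.2]
      exact ih (lo + 2) (by omega)
    · rw [loLoop2, dif_neg c]
      apply trimPairsFrontA_fix
      intro a b rest hr
      by_cases hlt : lo + 1 < hi
      · rw [seg_cons acc lo hi (by omega) hlen, seg_cons acc (lo + 1) hi hlt hlen] at hr
        intro hneg
        cases hr
        exact c ⟨hlt, hneg⟩
      · -- seg has length ≤ 1, cannot be a :: b :: rest
        have := seg_length acc lo hi hlen
        rw [hr] at this
        simp at this
        omega

theorem L4 (acc : List Int) (hi lo : Nat) (hlo : lo ≤ hi) (hlen : hi ≤ acc.length) :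
    trimPairsBackA (seg acc lo hi) = seg acc lo (hiLoop2 acc lo hi) := by
  induction hi using Nat.strong_induction_on with
  | _ hi ih =>
    by_cases c : lo + 1 < hi ∧ acc.getD (hi - 1) 0 + acc.getD (hi - 2) 0 < 0
    · have hsnoc1 := seg_snoc acc lo hi (by omega) hlen
      have hsnoc2 := seg_snoc acc lo (hi - 1) (by omega) (by omega)
      have h2 : hi - 1 - 1 = hi - 2 := by omega
      rw [h2] at hsnoc2
      rw [hiLoop2, dif_pos c, trimPairsBackA, dif_pos (by
        constructor
        · rw [seg_length acc lo hi hlen]; omega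
        · rw [hsnoc1, List.getLastD_concat, List.dropLast_concat, hsnoc2,
            List.getLastD_concat]
          exact c.2)]
      rw [hsnoc1, List.dropLast_concat, hsnoc2, List.dropLast_concat]
      exact ih (hi - 2) (by omega) (by omega) (by omega)
    · rw [hiLoop2, dif_neg c, trimPairsBackA, dif_neg]
      intro ⟨h1, h2⟩
      rw [seg_length acc lo hi hlen] at h1
      have hlt : lo + 1 < hi := by omega
      rw [seg_snoc acc lo hi (by omega) hlen, List.getLastD_concat, List.dropLast_concat,
        seg_snoc acc lo (hi - 1) (by omega) (by omega), List.getLastD_concat] at h2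
      have h3 : hi - 1 - 1 = hi - 2 := by omega
      rw [h3] at h2
      exact c ⟨hlt, h2⟩

-- bounds of the pointer loops
theorem loLoop1_le (acc : List Int) (lo hi : Nat) (h : lo ≤ hi) : loLoop1 acc lo hi ≤ hi := by
  rw [loLoop1]
  split
  · next c => exact loLoop1_le acc (lo + 1) hi (by omega)
  · exact h
termination_by hi - lo
decreasing_by omega

theorem hiLoop1_bounds (acc : List Int) (lo hi : Nat) (h : lo ≤ hi) :
    lo ≤ hiLoop1 acc lo hi ∧ hiLoop1 acc lo hi ≤ hi := by
  rw [hiLoop1]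
  split
  · next c =>
    have := hiLoop1_bounds acc lo (hi - 1) (by omega)
    omega
  · omega
termination_by hi
decreasing_by omega

theorem loLoop2_le (acc : List Int) (lo hi : Nat) (h : lo ≤ hi) : loLoop2 acc lo hi ≤ hi := by
  rw [loLoop2]
  split
  · next c => exact loLoop2_le acc (lo + 2) hi (by omega)
  · exact h
termination_by hi - lo
decreasing_by omega

-- A's whole trim pipeline equals B's pointer computation, for ANY list
theorem trim_eq (acc : List Int) :
    trimPairsBackA (trimPairsFrontA (trimBackA (trimFrontA acc))) =
      (acc.drop (loLoop2 acc (loLoop1 acc 0 acc.length) (hiLoop1 acc (loLoop1 acc 0 acc.length) acc.length))).take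
        (hiLoop2 acc (loLoop2 acc (loLoop1 acc 0 acc.length) (hiLoop1 acc (loLoop1 acc 0 acc.length) acc.length)) (hiLoop1 acc (loLoop1 acc 0 acc.length) acc.length)
          - loLoop2 acc (loLoop1 acc 0 acc.length) (hiLoop1 acc (loLoop1 acc 0 acc.length) acc.length)) := by
  have h0 : trimFrontA acc = seg acc (loLoop1 acc 0 acc.length) acc.length := by
    conv_lhs => rw [← seg_full acc]
    exact L1 acc acc.length 0 acc.length (by omega) (le_refl _)
  set lo1 := loLoop1 acc 0 acc.length with hlo1
  have hb1 : lo1 ≤ acc.length := loLoop1_le acc 0 acc.length (by omega)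
  have h1 : trimBackA (seg acc lo1 acc.length) = seg acc lo1 (hiLoop1 acc lo1 acc.length) :=
    L2 acc acc.length lo1 hb1 (le_refl _)
  set hi1 := hiLoop1 acc lo1 acc.length with hhi1
  have hb2 := hiLoop1_bounds acc lo1 acc.length hb1
  have h2 : trimPairsFrontA (seg acc lo1 hi1) = seg acc (loLoop2 acc lo1 hi1) hi1 :=
    L3 acc (hi1 - lo1) lo1 hi1 (le_refl _) hb2.2
  set lo2 := loLoop2 acc lo1 hi1 with hlo2
  have hb3 : lo2 ≤ hi1 := loLoop2_le acc lo1 hi1 hb2.1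
  have h3 : trimPairsBackA (seg acc lo2 hi1) = seg acc lo2 (hiLoop2 acc lo2 hi1) :=
    L4 acc hi1 lo2 hb3 hb2.2
  rw [h0, h1, h2, h3]
  rfl

-- ===== assembling the verdict =====

theorem squash_eq_alt (lst : List Int) : squash lst = squash_alt lst := by
  unfold squash squash_alt
  rw [foldl_stepB_eq_filter lst [], foldl_appendIf_eq_filter lst []]
  simp only [List.nil_append]
  by_cases hnil : lst = []
  · subst hnil
    simp only [List.filter_nil, List.foldl_nil, List.reverse_nil, List.length_nil]
    rw [loLoop1, dif_neg (by omega), hiLoop1, dif_neg (by omega),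
      loLoop2, dif_neg (by omega), hiLoop2, dif_neg (by omega)]
    simp
  · rw [if_neg hnil]
    cases hf : lst.filter (· ≠ 0) with
    | nil =>
      simp only [List.foldl_nil, List.reverse_nil, List.length_nil]
      rw [loLoop1, dif_neg (by omega), hiLoop1, dif_neg (by omega),
        loLoop2, dif_neg (by omega), hiLoop2, dif_neg (by omega)]
      simp
    | cons h t =>
      have hfold : (h :: t).foldl squashStepA [] = t.foldl squashStepA [h] := by
        simp [squashStepA]
      rw [hfold]
      exact trim_eq ((t.foldl squashStepA [h]).reverse)

-- ===== VERDICT (by name: the statement is the Claim_ definition above) =====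
theorem squash_spec : Claim_equal_squash := by
  intro lst _
  unfold Spec_squash
  exact squash_eq_alt lst
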